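-- pv_equiv track=rewrite | github.com/enzo-santos-ufpa/sd | sd/centro_distribuicao.py | _f
-- ===== SOURCE A (Python) =====
-- def _f(values: list[int], valor_max: int) -> list[int] | None:
--     for i in range(len(values)):
--         valores_prefixo = values[:i + 1]
--         soma_prefixo = sum(valores_prefixo)
--         if soma_prefixo < valor_max:
--             continue
--         i = -1 if soma_prefixo > valor_max else None
--         return valores_prefixo[:i]
--     return None
-- ===== SOURCE B (Python) =====
-- def _f(values: list[int], valor_max: int) -> list[int] | None:
--     soma = 0
--     escolhidos = []
--     for v in values:
--         soma += v
--         if soma > valor_max: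
--             return escolhidos
--         escolhidos.append(v)
--         if soma == valor_max:
--             return escolhidos
--     return None
-- ===== Notes on version B (the rewrite author's own statement) =====
-- stated objective: faster
-- what changed: B keeps a running sum and the accumulated prefix in one pass instead of re-slicing and re-summing every prefix for each index.
import Mathlib
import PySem

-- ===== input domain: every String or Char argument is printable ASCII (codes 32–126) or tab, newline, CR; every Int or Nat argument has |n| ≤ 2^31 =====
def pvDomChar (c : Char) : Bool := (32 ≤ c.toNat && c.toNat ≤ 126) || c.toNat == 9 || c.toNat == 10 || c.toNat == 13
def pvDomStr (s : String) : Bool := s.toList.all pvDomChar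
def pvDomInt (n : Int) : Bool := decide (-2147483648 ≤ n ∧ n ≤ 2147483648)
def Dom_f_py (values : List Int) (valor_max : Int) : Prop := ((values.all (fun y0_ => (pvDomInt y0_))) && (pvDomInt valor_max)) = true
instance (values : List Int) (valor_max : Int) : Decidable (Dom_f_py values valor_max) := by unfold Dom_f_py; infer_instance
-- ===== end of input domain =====

-- B replaces A's quadratic re-slice-and-resum of every prefix by a single pass with a running sum (faster, asymptotic).


-- ===== PORT A =====
-- the 'for i in range(len(values))' loop, with early return
def f_pyLoop (values : List Int) (valor_max : Int) : List Int → Option (List Int)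
  | [] => none
  | i :: rest =>
    let valores_prefixo := PySem.List.slice values none (some (i + 1))
    let soma_prefixo := valores_prefixo.sum
    if soma_prefixo < valor_max then f_pyLoop values valor_max rest
    else if soma_prefixo > valor_max then some (PySem.List.slice valores_prefixo none (some (-1)))
    else some (PySem.List.slice valores_prefixo none none)

def f_py (values : List Int) (valor_max : Int) : Option (List Int) :=
  f_pyLoop values valor_max (PySem.List.pyRange 0 values.length 1)

-- ===== PORT B =====
-- single pass: running sum 'soma', accumulated prefix 'escolhidos'
def f_pyAltGo (valor_max : Int) : List Int → Int → List Int → Option (List Int)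
  | [], _, _ => none
  | v :: rest, soma, escolhidos =>
    let soma' := soma + v
    if soma' > valor_max then some escolhidos
    else if soma' = valor_max then some (escolhidos ++ [v])
    else f_pyAltGo valor_max rest soma' (escolhidos ++ [v])

def f_py_alt (values : List Int) (valor_max : Int) : Option (List Int) :=
  f_pyAltGo valor_max values 0 []

-- ===== PRECONDITION & SPEC =====
def Spec_f_py (values : List Int) (valor_max : Int) (out : Option (List Int)) : Prop := out = f_py_alt values valor_max
instance (values : List Int) (valor_max : Int) (out : Option (List Int)) : Decidable (Spec_f_py values valor_max out) := by unfold Spec_f_py; infer_instance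

-- ===== CLAIM (what is proved, stated in full; the proofs are below) =====
def Claim_equal_f_py : Prop := ∀ (values : List Int) (valor_max : Int), Dom_f_py values valor_max → Spec_f_py values valor_max (f_py values valor_max)

-- ===== LEMMAS AND PROOFS =====
lemma f_py_key (valor_max : Int) :
    ∀ (rest taken : List Int),
      f_pyLoop (taken ++ rest) valor_max
        (PySem.List.pyRange (taken.length : Int) ((taken.length : Int) + (rest.length : Int)) 1)
      = f_pyAltGo valor_max rest taken.sum taken := by
  intro rest
  induction rest with
  | nil =>
    intro taken
    simp [f_pyLoop, f_pyAltGo]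
  | cons v rs ih =>
    intro taken
    have hlt : (taken.length : Int) < (taken.length : Int) + ((v :: rs).length : Int) := by
      simp only [List.length_cons]; push_cast; omega
    rw [PySem.List.pyRange_one_cons hlt]
    have hprefix : PySem.List.slice (taken ++ v :: rs) none (some ((taken.length : Int) + 1)) = taken ++ [v] := by
      have : ((taken.length : Int) + 1) = ((taken.length + 1 : Nat) : Int) := by push_cast; ring
      rw [this, PySem.List.slice_to_natCast]
      simp [List.take_append]
    show f_pyLoop (taken ++ v :: rs) valor_max (_ :: _) = _
    rw [f_pyLoop, hprefix]
    have hsum : (taken ++ [v]).sum = taken.sum + v := by simp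
    rw [hsum]
    rcases lt_trichotomy (taken.sum + v) valor_max with h | h | h
    · -- continue
      simp only [if_pos h]
      have harr : taken ++ v :: rs = (taken ++ [v]) ++ rs := by simp
      have hlen : ((taken ++ [v]).length : Int) = (taken.length : Int) + 1 := by simp
      have := ih (taken ++ [v])
      rw [hlen, hsum] at this
      rw [harr]
      have hb : (taken.length : Int) + 1 + (rs.length : Int)
          = (taken.length : Int) + ((v :: rs).length : Int) := by simp; ring
      rw [hb] at this
      rw [this]
      rw [f_pyAltGo]
      simp only [if_neg (by omega : ¬ taken.sum + v > valor_max),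
        if_neg (by omega : ¬ taken.sum + v = valor_max)]
    · -- equal: return whole prefix
      rw [if_neg (by omega), if_neg (by omega)]
      rw [PySem.List.slice_none_none, f_pyAltGo]
      simp only [if_neg (by omega : ¬ taken.sum + v > valor_max), if_pos h]
    · -- overshoot: return prefix[:-1]
      rw [if_neg (by omega), if_pos (by omega)]
      rw [PySem.List.slice_to_neg_one]
      rw [f_pyAltGo]
      simp only [if_pos (by omega : taken.sum + v > valor_max)]
      simp

-- ===== VERDICT (by name: the statement is the Claim_ definition above) =====
theorem f_py_spec : Claim_equal_f_py := by
  intro values valor_max _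
  unfold Spec_f_py f_py f_py_alt
  have := f_py_key valor_max values []
  simpa using this
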